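-- pv_equiv track=rewrite | github.com/5OCEANS/SoYoon_Repository | 마라톤/코스 51/숫자 POP.py | max_continuous_length
-- ===== SOURCE A (Python) =====
-- from collections import defaultdict
--
-- def max_continuous_length(N, K, A):
--   pos = defaultdict(list)
--
--   for idx, num in enumerate(A):
--     pos[num].append(idx)
--
--   max_len = 0
--   for indices in pos.values():
--     left = 0
--
--     for right in range(len(indices)):
--       needed_deletion = indices[right] - indices[left] - (right - left)
--       while needed_deletion > K:
--         left += 1
--         needed_deletion = indices[right] - indices[left] - (right - left)
--       max_len = max(max_len, right - left + 1)
--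
--   return max_len
-- ===== SOURCE B (Python) =====
-- from collections import defaultdict
--
-- def _bisect_left(b, x):
--     lo, hi = 0, len(b)
--     while lo < hi:
--         mid = (lo + hi) // 2
--         if b[mid] < x:
--             lo = mid + 1
--         else:
--             hi = mid
--     return lo
--
-- def max_continuous_length(N, K, A):
--     pos = defaultdict(list)
--     for idx, num in enumerate(A):
--         pos[num].append(idx)
--     max_len = 0
--     for indices in pos.values():
--         b = [v - i for i, v in enumerate(indices)]
--         for right in range(len(b)):
--             left = _bisect_left(b, b[right] - K)
--             cur = right - left + 1
--             if cur > max_len: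
--                 max_len = cur
--     return max_len
-- ===== Notes on version B (the rewrite author's own statement) =====
-- stated objective: alternative
-- what changed: Replaces A's incremental two-pointer window per value group with a per-right binary search on the transformed non-decreasing array b[i]=indices[i]-i, so the left boundary is recomputed independently for each right instead of being slid forward.
import Mathlib
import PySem

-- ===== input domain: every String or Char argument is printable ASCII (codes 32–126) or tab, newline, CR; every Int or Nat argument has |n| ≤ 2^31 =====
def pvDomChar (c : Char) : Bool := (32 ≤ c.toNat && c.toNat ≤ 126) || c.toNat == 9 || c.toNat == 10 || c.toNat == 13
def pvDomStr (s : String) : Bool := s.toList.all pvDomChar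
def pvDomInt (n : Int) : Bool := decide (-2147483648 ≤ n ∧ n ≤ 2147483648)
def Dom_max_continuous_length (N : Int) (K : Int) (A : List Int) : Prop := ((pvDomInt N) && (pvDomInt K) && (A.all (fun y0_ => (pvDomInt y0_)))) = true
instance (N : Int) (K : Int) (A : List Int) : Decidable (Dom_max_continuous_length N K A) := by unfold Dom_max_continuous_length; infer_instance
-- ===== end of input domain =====

-- B replaces the incremental two-pointer left boundary with an independent binary search per
-- right index on the transformed array b[i] = indices[i] - i (objective: alternative algorithm,
-- same results; A raises IndexError when K < 0 and A is nonempty, excluded by Pre_).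

-- ===== PORT A =====
-- needed_deletion = indices[right] - indices[left] - (right - left)
def pvNeed (ind : List Int) (r l : Int) : Int :=
  PySem.List.pyGetD ind r 0 - PySem.List.pyGetD ind l 0 - (r - l)

-- the 'while needed_deletion > K: left += 1' loop; fuel makes it total (Python raises
-- IndexError exactly where the fuel/default could matter, excluded by Pre_)
def pvWhile (ind : List Int) (K r : Int) (l : Int) : Nat → Int
  | 0 => l
  | fuel+1 => if pvNeed ind r l > K then pvWhile ind K r (l+1) fuel else l

def max_continuous_length (N : Int) (K : Int) (A : List Int) : Int :=
  let pos := (PySem.List.enumerate A 0).foldl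
      (fun d p => d.modify p.2 [] (fun cur => cur ++ [p.1])) PySem.Dict.empty
  pos.values.foldl (fun max_len ind =>
    ((PySem.List.pyRange 0 (ind.length : Int) 1).foldl
      (fun (s : Int × Int) right =>
        let left := pvWhile ind K right s.1 ind.length
        (left, max s.2 (right - left + 1))) (0, max_len)).2) 0

-- ===== PORT B =====
-- hand-written bisect_left from Source B; fuel (hi-lo).toNat makes the while loop total
def pvBisectGo (b : List Int) (x : Int) : Nat → Int → Int → Int
  | 0, lo, _ => lo
  | fuel+1, lo, hi =>
    if lo < hi then
      let mid := PySem.Int.floordiv (lo + hi) 2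
      if PySem.List.pyGetD b mid 0 < x then pvBisectGo b x fuel (mid + 1) hi
      else pvBisectGo b x fuel lo mid
    else lo

def pvBisect (b : List Int) (x : Int) (lo hi : Int) : Int :=
  pvBisectGo b x (hi - lo).toNat lo hi

def max_continuous_length_alt (N : Int) (K : Int) (A : List Int) : Int :=
  let pos := (PySem.List.enumerate A 0).foldl
      (fun d p => d.modify p.2 [] (fun cur => cur ++ [p.1])) PySem.Dict.empty
  pos.values.foldl (fun max_len ind =>
    let b := (PySem.List.enumerate ind 0).map (fun p => p.2 - p.1)
    (PySem.List.pyRange 0 (b.length : Int) 1).foldl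
      (fun acc right =>
        let left := pvBisect b (PySem.List.pyGetD b right 0 - K) 0 (b.length : Int)
        let cur := right - left + 1
        if cur > acc then cur else acc) max_len) 0

-- ===== PRECONDITION & SPEC =====
-- Pre_ excludes K < 0 with nonempty A: there A's inner while loop raises IndexError.
def Pre_max_continuous_length (N : Int) (K : Int) (A : List Int) : Prop := 0 ≤ K ∨ A = []
instance (N : Int) (K : Int) (A : List Int) : Decidable (Pre_max_continuous_length N K A) := by
  unfold Pre_max_continuous_length; infer_instance
def pvWitness_max_continuous_length : Int × Int × List Int := (3, 1, [1, 2, 1])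

def Spec_max_continuous_length (N : Int) (K : Int) (A : List Int) (out : Int) : Prop :=
  out = max_continuous_length_alt N K A
instance (N : Int) (K : Int) (A : List Int) (out : Int) : Decidable (Spec_max_continuous_length N K A out) := by
  unfold Spec_max_continuous_length; infer_instance

-- ===== CLAIM (what is proved, stated in full; the proofs are below) =====
def Claim_equal_max_continuous_length : Prop := ∀ (N : Int) (K : Int) (A : List Int), Dom_max_continuous_length N K A → Pre_max_continuous_length N K A → Spec_max_continuous_length N K A (max_continuous_length N K A)
-- ===== LEMMAS AND PROOFS =====

-- transformed value b[k] = ind[k] - k, as a total function on Nat indices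
def pvBlf (ind : List Int) (k : Nat) : Int := ind.getD k 0 - (k : Int)

-- least feasible left boundary for right index r (given 0 ≤ K it is the least l with
-- ind[r]-ind[l]-(r-l) ≤ K, i.e. pvBlf r - pvBlf l ≤ K)
def pvMinL (ind : List Int) (K : Int) (r : Nat) : Nat :=
  Nat.find (p := fun l => K < pvBlf ind r - pvBlf ind l → r ≤ l) ⟨r, fun _ => le_refl r⟩

lemma pvNeed_eq (ind : List Int) (r l : Nat) :
    pvNeed ind (r : Int) (l : Int) = pvBlf ind r - pvBlf ind l := by
  simp [pvNeed, pvBlf, PySem.List.pyGetD_natCast]; ring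

lemma pvMinL_le_self (ind : List Int) (K : Int) (r : Nat) : pvMinL ind K r ≤ r :=
  Nat.find_le (fun _ => le_refl r)

lemma pvMinL_feas (ind : List Int) (K : Int) (hK : 0 ≤ K) (r : Nat) :
    pvBlf ind r - pvBlf ind (pvMinL ind K r) ≤ K := by
  have hs : K < pvBlf ind r - pvBlf ind (pvMinL ind K r) → r ≤ pvMinL ind K r :=
    Nat.find_spec (p := fun l => K < pvBlf ind r - pvBlf ind l → r ≤ l) ⟨r, fun _ => le_refl r⟩
  have hle := pvMinL_le_self ind K r
  by_contra h
  have heq : pvMinL ind K r = r := le_antisymm hle (hs (by omega))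
  rw [heq] at h; omega

lemma pvMinL_min (ind : List Int) (K : Int) (r : Nat) :
    ∀ i < pvMinL ind K r, K < pvBlf ind r - pvBlf ind i := by
  intro i hi
  have hm : ¬ (K < pvBlf ind r - pvBlf ind i → r ≤ i) :=
    Nat.find_min (p := fun l => K < pvBlf ind r - pvBlf ind l → r ≤ l)
      ⟨r, fun _ => le_refl r⟩ hi
  by_contra h; exact hm (fun hlt => absurd hlt (by omega))

lemma le_pvMinL_of_inf (ind : List Int) (K : Int) (hK : 0 ≤ K) (r l : Nat)
    (hinf : ∀ i < l, K < pvBlf ind r - pvBlf ind i) : l ≤ pvMinL ind K r := by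
  by_contra h
  have h1 := hinf (pvMinL ind K r) (by omega)
  have h2 := pvMinL_feas ind K hK r
  omega

lemma pvBlf_mono (ind : List Int) (hmono : ind.Pairwise (· < ·)) :
    ∀ p q : Nat, p ≤ q → q < ind.length → pvBlf ind p ≤ pvBlf ind q := by
  have hget : ∀ i j : Nat, (hj : j < ind.length) → i < j → ind.getD i 0 < ind.getD j 0 := by
    intro i j hj hij
    have := (List.pairwise_iff_getElem (R := (· < · : Int → Int → Prop))).mp hmono i j
      (lt_trans hij hj) hj hij
    rwa [List.getD_eq_getElem ind 0 (lt_trans hij hj), List.getD_eq_getElem ind 0 hj]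
  intro p q hpq hq
  induction q with
  | zero =>
    have hp : p = 0 := by omega
    rw [hp]
  | succ q ih =>
    rcases Nat.lt_or_ge p (q+1) with h | h
    · have h1 : pvBlf ind p ≤ pvBlf ind q := ih (by omega) (by omega)
      have h2 := hget q (q+1) hq (by omega)
      simp only [pvBlf] at *
      push_cast
      omega
    · have hp : p = q + 1 := by omega
      rw [hp]

lemma pvWhile_spec (ind : List Int) (K : Int) (hK : 0 ≤ K) (r : Nat) :
    ∀ (fuel : Nat) (l : Nat), pvMinL ind K r - l < fuel →
    (∀ i < l, K < pvBlf ind r - pvBlf ind i) →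
    pvWhile ind K (r : Int) (l : Int) fuel = (pvMinL ind K r : Int) := by
  intro fuel
  induction fuel with
  | zero =>
    intro l h hinf
    have := le_pvMinL_of_inf ind K hK r l hinf
    omega
  | succ fuel ih =>
    intro l h hinf
    have hle : l ≤ pvMinL ind K r := le_pvMinL_of_inf ind K hK r l hinf
    rw [pvWhile, pvNeed_eq]
    by_cases hc : K < pvBlf ind r - pvBlf ind l
    · have hne : l ≠ pvMinL ind K r := by
        intro heq; rw [heq] at hc; exact absurd (pvMinL_feas ind K hK r) (by omega)
      have hcast : ((l : Int) + 1) = ((l + 1 : Nat) : Int) := by push_cast; ring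
      rw [if_pos (by omega), hcast]
      refine ih (l+1) (by omega) ?_
      intro i hi
      rcases Nat.lt_or_ge i l with h' | h'
      · exact hinf i h'
      · have hil : i = l := by omega
        rwa [hil]
    · rw [if_neg (by omega)]
      have h2 : pvMinL ind K r ≤ l := by
        by_contra h'
        exact hc (pvMinL_min ind K r l (by omega))
      omega

lemma pvBisect_spec (b : List Int) (x : Int)
    (hmono : ∀ p q : Nat, p ≤ q → q < b.length → b.getD p 0 ≤ b.getD q 0) :
    ∀ (m : Nat) (lo hi : Int), (hi - lo).toNat ≤ m → 0 ≤ lo → lo ≤ hi → hi ≤ (b.length : Int) →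
    (∀ i : Nat, (i : Int) < lo → b.getD i 0 < x) →
    (∀ i : Nat, hi ≤ (i : Int) → i < b.length → x ≤ b.getD i 0) →
    lo ≤ pvBisectGo b x m lo hi ∧ pvBisectGo b x m lo hi ≤ hi ∧
    (∀ i : Nat, (i : Int) < pvBisectGo b x m lo hi → b.getD i 0 < x) ∧
    (∀ i : Nat, pvBisectGo b x m lo hi ≤ (i : Int) → i < b.length → x ≤ b.getD i 0) := by
  intro m
  induction m with
  | zero =>
    intro lo hi hm h0 hlh hhi hlow hhigh
    simp only [pvBisectGo]
    refine ⟨le_refl _, hlh, hlow, fun i hi1 hi2 => hhigh i (by omega) hi2⟩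
  | succ m ih =>
    intro lo hi hm h0 hlh hhi hlow hhigh
    by_cases hc : lo < hi
    · simp only [pvBisectGo, if_pos hc]
      have hmid1 := (PySem.Int.le_floordiv_iff_mul_le (a := lo + hi) (b := 2) (q := lo) (by omega)).mpr (by omega)
      have hmid2 := (PySem.Int.floordiv_lt_iff_lt_mul (a := lo + hi) (b := 2) (q := hi) (by omega)).mpr (by omega)
      set mid := PySem.Int.floordiv (lo + hi) 2 with hmid
      obtain ⟨midN, hmidN⟩ : ∃ n : Nat, (n : Int) = mid := ⟨mid.toNat, Int.toNat_of_nonneg (by omega)⟩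
      have hmidlen : midN < b.length := by omega
      have hbm : PySem.List.pyGetD b mid 0 = b.getD midN 0 := by
        rw [← hmidN, PySem.List.pyGetD_natCast]
      by_cases hlt : PySem.List.pyGetD b mid 0 < x
      · rw [if_pos hlt]
        have hrec := ih (mid+1) hi (by omega) (by omega) (by omega) hhi
          (by intro i hi'
              rcases Int.lt_or_le (i : Int) lo with h' | h'
              · exact hlow i h'
              · have hile : i ≤ midN := by omega
                calc b.getD i 0 ≤ b.getD midN 0 := hmono i midN hile hmidlen
                  _ < x := by rwa [hbm] at hlt)
          hhigh
        exact ⟨by omega, hrec.2.1, hrec.2.2.1, hrec.2.2.2⟩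
      · rw [if_neg hlt]
        have hxm : x ≤ b.getD midN 0 := by rw [← hbm]; omega
        have hrec := ih lo mid (by omega) h0 (by omega) (by omega) hlow
          (by intro i hi1 hi2
              have hge : midN ≤ i := by omega
              calc x ≤ b.getD midN 0 := hxm
                _ ≤ b.getD i 0 := hmono midN i hge hi2)
        exact ⟨hrec.1, by omega, hrec.2.2.1, hrec.2.2.2⟩
    · simp only [pvBisectGo, if_neg hc]
      refine ⟨le_refl _, hlh, hlow, fun i hi1 hi2 => hhigh i (by omega) hi2⟩

-- the transformed list built by B
def pvBL (ind : List Int) : List Int := (PySem.List.enumerate ind 0).map (fun p => p.2 - p.1)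

lemma pvBL_length (ind : List Int) : (pvBL ind).length = ind.length := by
  simp [pvBL, PySem.List.length_enumerate]

lemma pvBL_getD (ind : List Int) (k : Nat) (hk : k < ind.length) :
    (pvBL ind).getD k 0 = pvBlf ind k := by
  have h1 : (pvBL ind)[k]? = some (ind[k] - (k : Int)) := by
    simp [pvBL, List.getElem?_map, PySem.List.getElem?_enumerate, List.getElem?_eq_getElem hk]
  simp [List.getD_eq_getElem?_getD, h1, pvBlf, List.getElem?_eq_getElem hk]

-- bisect over the full transformed list computes pvMinL
lemma pvBisect_eq_minL (ind : List Int) (K : Int) (hK : 0 ≤ K)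
    (hmono : ind.Pairwise (· < ·)) (r : Nat) (hr : r < ind.length) :
    pvBisect (pvBL ind) (PySem.List.pyGetD (pvBL ind) (r : Int) 0 - K) 0 ((pvBL ind).length : Int)
      = (pvMinL ind K r : Int) := by
  have hblm : ∀ p q : Nat, p ≤ q → q < (pvBL ind).length →
      (pvBL ind).getD p 0 ≤ (pvBL ind).getD q 0 := by
    intro p q hpq hq
    rw [pvBL_length] at hq
    rw [pvBL_getD ind p (by omega), pvBL_getD ind q hq]
    exact pvBlf_mono ind hmono p q hpq hq
  have hx : PySem.List.pyGetD (pvBL ind) (r : Int) 0 - K = pvBlf ind r - K := by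
    rw [PySem.List.pyGetD_natCast, pvBL_getD ind r hr]
  set x := PySem.List.pyGetD (pvBL ind) (r : Int) 0 - K with hxdef
  have hlen : (pvBL ind).length = ind.length := pvBL_length ind
  have hspec := pvBisect_spec (pvBL ind) x hblm ((((pvBL ind).length : Int)) - 0).toNat 0
      ((pvBL ind).length : Int) (le_refl _) (le_refl _) (by omega) (le_refl _)
      (by intro i h; omega) (by intro i h1 h2; omega)
  rw [show pvBisectGo (pvBL ind) x ((((pvBL ind).length : Int)) - 0).toNat 0 ((pvBL ind).length : Int)
        = pvBisect (pvBL ind) x 0 ((pvBL ind).length : Int) from rfl] at hspec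
  obtain ⟨h1, h2, h3, h4⟩ := hspec
  set res := pvBisect (pvBL ind) x 0 ((pvBL ind).length : Int) with hres
  -- res ≤ r
  have hresr : res ≤ (r : Int) := by
    by_contra h
    have := h3 r (by omega)
    rw [pvBL_getD ind r hr, hx] at this
    omega
  obtain ⟨resN, hresN⟩ : ∃ n : Nat, (n : Int) = res := ⟨res.toNat, Int.toNat_of_nonneg h1⟩
  have hresNlen : resN < ind.length := by omega
  -- all below res are infeasible
  have hinf : ∀ i < resN, K < pvBlf ind r - pvBlf ind i := by
    intro i hi
    have := h3 i (by omega)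
    rw [pvBL_getD ind i (by omega), hx] at this
    omega
  have hge := le_pvMinL_of_inf ind K hK r resN hinf
  -- res itself is feasible
  have hfeas : pvBlf ind r - pvBlf ind resN ≤ K := by
    have := h4 resN (by omega) (by omega)
    rw [pvBL_getD ind resN hresNlen, hx] at this
    omega
  have hle : pvMinL ind K r ≤ resN := by
    by_contra h
    exact absurd hfeas (by have := pvMinL_min ind K r resN (by omega); omega)
  omega

-- running maximum of window lengths over rights < m
def pvAM (ind : List Int) (K : Int) (m : Nat) (acc : Int) : Int :=
  (List.range m).foldl (fun (a : Int) (r : Nat) => max a ((r : Int) - ((pvMinL ind K r : Nat) : Int) + 1)) acc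

-- A's inner loop over rights < m, Nat-indexed
lemma pvSA_spec (ind : List Int) (K : Int) (hK : 0 ≤ K) (hmono : ind.Pairwise (· < ·)) :
    ∀ (m : Nat), m ≤ ind.length → ∀ (acc : Int),
    (PySem.List.pyRange 0 (m : Int) 1).foldl
      (fun (s : Int × Int) right =>
        let left := pvWhile ind K right s.1 ind.length
        (left, max s.2 (right - left + 1))) (0, acc)
    = ((if m = 0 then (0 : Int) else ((pvMinL ind K (m-1) : Nat) : Int)), pvAM ind K m acc) := by
  intro m
  induction m with
  | zero => intro _ acc; simp [pvAM, PySem.List.pyRange_one_eq_nil (by omega)]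
  | succ m ih =>
    intro hm acc
    have hsplit : PySem.List.pyRange 0 ((m+1 : Nat) : Int) 1
        = PySem.List.pyRange 0 (m : Int) 1 ++ [(m : Int)] := by
      rw [show ((m+1 : Nat) : Int) = (m : Int) + 1 by push_cast; ring]
      exact PySem.List.pyRange_one_succ_right (by omega)
    rw [hsplit, List.foldl_append, ih (by omega) acc]
    simp only [List.foldl_cons, List.foldl_nil]
    have hwhile : pvWhile ind K (m : Int)
        (if m = 0 then (0 : Int) else ((pvMinL ind K (m-1) : Nat) : Int)) ind.length
        = ((pvMinL ind K m : Nat) : Int) := by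
      by_cases h0 : m = 0
      · subst h0
        rw [if_pos rfl, show (0 : Int) = ((0 : Nat) : Int) from rfl]
        exact pvWhile_spec ind K hK 0 ind.length 0
          (by have := pvMinL_le_self ind K 0; omega) (by intro i hi; omega)
      · rw [if_neg h0]
        refine pvWhile_spec ind K hK m ind.length (pvMinL ind K (m-1))
          (by have h1 := pvMinL_le_self ind K m
              have h2 := pvMinL_le_self ind K (m-1); omega)
          ?_
        intro i hi
        have hprev := pvMinL_min ind K (m-1) i hi
        have hstep : pvBlf ind (m-1) ≤ pvBlf ind m :=
          pvBlf_mono ind hmono (m-1) m (by omega) (by omega)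
        omega
    rw [hwhile]
    simp only [Prod.mk.injEq]
    constructor
    · simp
    · simp only [pvAM, List.range_succ, List.foldl_append, List.foldl_cons, List.foldl_nil]

-- B's inner loop over rights < m, Nat-indexed
lemma pvSB_spec (ind : List Int) (K : Int) (hK : 0 ≤ K) (hmono : ind.Pairwise (· < ·)) :
    ∀ (m : Nat), m ≤ ind.length → ∀ (acc : Int),
    (PySem.List.pyRange 0 (m : Int) 1).foldl
      (fun (a : Int) right =>
        let left := pvBisect (pvBL ind) (PySem.List.pyGetD (pvBL ind) right 0 - K) 0
          ((pvBL ind).length : Int)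
        let cur := right - left + 1
        if cur > a then cur else a) acc
    = pvAM ind K m acc := by
  intro m
  induction m with
  | zero => intro _ acc; simp [pvAM, PySem.List.pyRange_one_eq_nil (by omega)]
  | succ m ih =>
    intro hm acc
    have hsplit : PySem.List.pyRange 0 ((m+1 : Nat) : Int) 1
        = PySem.List.pyRange 0 (m : Int) 1 ++ [(m : Int)] := by
      rw [show ((m+1 : Nat) : Int) = (m : Int) + 1 by push_cast; ring]
      exact PySem.List.pyRange_one_succ_right (by omega)
    rw [hsplit, List.foldl_append, ih (by omega) acc]
    simp only [List.foldl_cons, List.foldl_nil, pvAM, List.range_succ, List.foldl_append]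
    rw [pvBisect_eq_minL ind K hK hmono m (by omega)]
    have hmax : ∀ a c : Int, (if c > a then c else a) = max a c := by
      intro a c; split_ifs with h <;> omega
    rw [hmax]

-- groups appearing in pos.values are strictly increasing position lists
lemma pvValues_mono (A : List Int) :
    ∀ ind ∈ ((PySem.List.enumerate A 0).foldl
      (fun d p => d.modify p.2 [] (fun cur => cur ++ [p.1])) PySem.Dict.empty).values,
    ind.Pairwise (· < ·) := by
  intro ind hmem
  set l := (PySem.List.enumerate A 0).map Prod.swap with hl
  have hfold : (PySem.List.enumerate A 0).foldl
      (fun d p => d.modify p.2 [] (fun cur => cur ++ [p.1])) PySem.Dict.empty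
      = l.foldl (fun d p => d.modify p.1 [] (fun cur => cur ++ [p.2])) PySem.Dict.empty := by
    rw [hl, List.foldl_map]
    rfl
  rw [hfold] at hmem
  have hnd : (l.foldl (fun d p => d.modify p.1 [] (fun cur => cur ++ [p.2]))
      PySem.Dict.empty).keys.Nodup := by
    exact PySem.Dict.nodup_keys_foldl_modify_key (l := l) (key := Prod.fst)
      (d0 := []) (f := fun d p => (fun cur => cur ++ [p.2])) (d := PySem.Dict.empty)
      (by simp [PySem.Dict.empty])
  rw [PySem.Dict.values_eq_map_keys _ hnd []] at hmem
  obtain ⟨c, _, hc⟩ := List.mem_map.mp hmem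
  rw [PySem.Dict.getD_foldl_modify_append (l := l) (c := c) (d := PySem.Dict.empty)] at hc
  have hemp : (PySem.Dict.empty : PySem.Dict Int (List Int)).getD c [] = [] := by
    simp [PySem.Dict.empty, PySem.Dict.getD, PySem.Dict.get?]
  rw [hemp, List.nil_append] at hc
  subst hc
  rw [hl]
  have hpw : (PySem.List.enumerate A 0).Pairwise (fun p q => p.1 < q.1) :=
    PySem.List.pairwise_lt_enumerate A 0
  have hsw : ((PySem.List.enumerate A 0).map Prod.swap).Pairwise (fun p q => p.2 < q.2) := by
    rw [List.pairwise_map]; exact hpw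
  have hfil := List.Pairwise.filter (R := fun (p q : Int × Int) => p.2 < q.2) (fun p => p.1 == c) hsw
  rw [List.pairwise_map]
  exact hfil.imp (fun h => h)

-- per-group equality of the two inner loops
lemma pvGroup_eq (ind : List Int) (K : Int) (hK : 0 ≤ K) (hmono : ind.Pairwise (· < ·))
    (acc : Int) :
    ((PySem.List.pyRange 0 (ind.length : Int) 1).foldl
      (fun (s : Int × Int) right =>
        let left := pvWhile ind K right s.1 ind.length
        (left, max s.2 (right - left + 1))) (0, acc)).2
    = (PySem.List.pyRange 0 (((pvBL ind).length : Int)) 1).foldl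
      (fun a right =>
        let left := pvBisect (pvBL ind) (PySem.List.pyGetD (pvBL ind) right 0 - K) 0
          ((pvBL ind).length : Int)
        let cur := right - left + 1
        if cur > a then cur else a) acc := by
  rw [pvSA_spec ind K hK hmono ind.length (le_refl _) acc,
      pvSB_spec ind K hK hmono ((pvBL ind).length) (by rw [pvBL_length]) acc, pvBL_length]

-- ===== VERDICT (by name: the statement is the Claim_ definition above) =====
theorem max_continuous_length_spec : Claim_equal_max_continuous_length := by
  intro N K A _ hpre
  unfold Spec_max_continuous_length
  rcases hpre with hK | rfl
  · show max_continuous_length N K A = max_continuous_length_alt N K A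
    unfold max_continuous_length max_continuous_length_alt
    show ((PySem.List.enumerate A 0).foldl
        (fun d p => d.modify p.2 [] (fun cur => cur ++ [p.1])) PySem.Dict.empty).values.foldl
        (fun max_len ind =>
          ((PySem.List.pyRange 0 (ind.length : Int) 1).foldl
            (fun (s : Int × Int) right =>
              let left := pvWhile ind K right s.1 ind.length
              (left, max s.2 (right - left + 1))) (0, max_len)).2) 0
      = ((PySem.List.enumerate A 0).foldl
        (fun d p => d.modify p.2 [] (fun cur => cur ++ [p.1])) PySem.Dict.empty).values.foldl
        (fun max_len ind =>
          let b := (PySem.List.enumerate ind 0).map (fun p => p.2 - p.1)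
          (PySem.List.pyRange 0 (b.length : Int) 1).foldl
            (fun acc right =>
              let left := pvBisect b (PySem.List.pyGetD b right 0 - K) 0 (b.length : Int)
              let cur := right - left + 1
              if cur > acc then cur else acc) max_len) 0
    apply PySem.List.foldl_congr_mem
    intro acc ind hmem
    exact pvGroup_eq ind K hK (pvValues_mono A ind hmem) acc
  · rfl
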